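-- pv_equiv track=rewrite | github.com/yingdongucas/inconsistency_detection | measurement/version_mapping.py | normalize_point
-- ===== SOURCE A (Python) =====
-- def normalize_point(version_point):
--     change_flg = False
--     for ii in range(5):
--         replace_str = '.' + '0' * ii
--         if version_point.endswith(replace_str):
--             new = version_point[:-ii-1]
--             change_flg = True
--             return new, change_flg
--         else:
--             change_flg = False
--     return version_point, change_flg
-- ===== SOURCE B (Python) =====
-- def normalize_point(version_point):
--     head, sep, tail = version_point.rpartition('.')
--     if sep and len(tail) <= 4 and all(c == '0' for c in tail):
--         return head, True
--     return version_point, False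
-- ===== Notes on version B (the rewrite author's own statement) =====
-- stated objective: simpler
-- what changed: Replaced the five-iteration suffix-enumeration loop (testing '.', '.0', ..., '.0000' with endswith and negative slicing) by a single rpartition at the last dot followed by a validation of the trailing segment (length <= 4 and all zeros).
import Mathlib
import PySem

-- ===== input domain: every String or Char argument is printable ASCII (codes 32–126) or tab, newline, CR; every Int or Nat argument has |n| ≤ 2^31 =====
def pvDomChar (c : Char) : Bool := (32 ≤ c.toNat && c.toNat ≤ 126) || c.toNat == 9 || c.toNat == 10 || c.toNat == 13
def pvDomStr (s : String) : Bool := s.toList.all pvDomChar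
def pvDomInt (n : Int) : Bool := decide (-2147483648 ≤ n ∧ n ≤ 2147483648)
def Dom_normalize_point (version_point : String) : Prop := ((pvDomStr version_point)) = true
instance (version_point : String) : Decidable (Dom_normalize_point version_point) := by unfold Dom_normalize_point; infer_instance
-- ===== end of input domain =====

-- B replaces A's five-iteration suffix-enumeration loop by a single split at the last dot
-- (rpartition) plus a validation of the trailing segment: a simpler decomposition, same cost.


-- ===== PORT A =====
-- the 'for ii in range(5)' loop with its early return, as structural recursion over the range list
def normalize_point_go (version_point : String) : List Int → String × Bool
  | [] => (version_point, false)                     -- loop fell through: change_flg = False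
  | ii :: rest =>
      -- replace_str = '.' + '0' * ii  (exact: ii ≥ 0 throughout range(5))
      let replace_str := String.ofList ('.' :: List.replicate ii.toNat '0')
      if PySem.Str.endswith version_point replace_str then
        (PySem.Str.slice version_point none (some (-ii - 1)), true)   -- version_point[:-ii-1]
      else
        normalize_point_go version_point rest

def normalize_point (version_point : String) : String × Bool :=
  normalize_point_go version_point (PySem.List.pyRange 0 5 1)

-- ===== PORT B =====
-- version_point.rpartition('.') ported by hand (exact for the one-character separator '.'):
-- split at the LAST '.'; if there is none, head = sep = '' and tail = the whole string
def rpartition_dot (cs : List Char) : List Char × List Char × List Char :=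
  let tl := (cs.reverse.takeWhile (fun c => c ≠ '.')).reverse
  if tl.length = cs.length then ([], [], cs)
  else (cs.take (cs.length - tl.length - 1), ['.'], tl)

def normalize_point_alt (version_point : String) : String × Bool :=
  let p := rpartition_dot version_point.toList
  if p.2.1 ≠ [] ∧ p.2.2.length ≤ 4 ∧ p.2.2.all (fun c => c == '0') then
    (String.ofList p.1, true)
  else
    (version_point, false)

-- ===== PRECONDITION & SPEC =====
def Spec_normalize_point (version_point : String) (out : String × Bool) : Prop := out = normalize_point_alt version_point
instance (version_point : String) (out : String × Bool) : Decidable (Spec_normalize_point version_point out) := by unfold Spec_normalize_point; infer_instance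

-- ===== CLAIM (what is proved, stated in full; the proofs are below) =====
def Claim_equal_normalize_point : Prop := ∀ (version_point : String), Dom_normalize_point version_point → Spec_normalize_point version_point (normalize_point version_point)

-- ===== LEMMAS AND PROOFS =====

-- a slice s[:a] with negative a that stays in range is a take of length len + a
lemma slice_neg (cs : List Char) (a : Int) (h1 : a < 0) (h2 : 0 ≤ (cs.length:Int) + a) :
    PySem.List.slice cs none (some a) = cs.take ((cs.length:Int) + a).toNat := by
  simp [PySem.List.slice, PySem.List.clampIdx, h1, if_neg (not_lt.mpr h2)]

-- '0'^ii ++ "." is a prefix of r  ↔  the maximal dot-free prefix of r has length ii, is all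
-- zeros, and a dot follows it
lemma prefix_char (r : List Char) (ii : Nat) :
    (List.replicate ii '0' ++ ['.']) <+: r ↔
      (ii = (List.takeWhile (fun c => !decide (c = '.')) r).length ∧
       (∀ x ∈ List.takeWhile (fun c => !decide (c = '.')) r, x = '0') ∧
       (List.takeWhile (fun c => !decide (c = '.')) r).length < r.length) := by
  induction r generalizing ii with
  | nil => simp
  | cons c r ih =>
    rw [List.takeWhile_cons]
    by_cases hc : c = '.'
    · subst hc
      cases ii with
      | zero => simp
      | succ n => simp [List.replicate_succ, List.cons_prefix_cons]
    · cases ii with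
      | zero =>
        simp [hc, List.cons_prefix_cons]
        intro h; exact absurd h.symm hc
      | succ n =>
        rw [List.replicate_succ, List.cons_append, List.cons_prefix_cons]
        simp only [hc, decide_false, Bool.not_false, if_true,
          List.length_cons, List.mem_cons, ih n]
        constructor
        · rintro ⟨h0, h1, h2, h3⟩
          exact ⟨by omega, by rintro x (rfl | hx); exact h0.symm; exact h2 x hx, by omega⟩
        · rintro ⟨h1, h2, h3⟩
          exact ⟨(h2 c (Or.inl rfl)).symm, by omega, fun x hx => h2 x (Or.inr hx), by omega⟩

-- A's ii-th test, characterised on the reversed character list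
lemma endswith_test (s : String) (ii : Nat) :
    (PySem.Str.endswith s (String.ofList ('.' :: List.replicate ii '0')) = true) ↔
      (ii = (List.takeWhile (fun c => !decide (c = '.')) s.toList.reverse).length ∧
       (∀ x ∈ List.takeWhile (fun c => !decide (c = '.')) s.toList.reverse, x = '0') ∧
       (List.takeWhile (fun c => !decide (c = '.')) s.toList.reverse).length < s.toList.length) := by
  rw [show PySem.Str.endswith s (String.ofList ('.' :: List.replicate ii '0'))
        = PySem.Chars.endswith s.toList ('.' :: List.replicate ii '0') by
      simp [PySem.Str.endswith]]
  rw [PySem.Chars.endswith_iff, ← List.reverse_prefix]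
  simp only [List.reverse_cons, List.reverse_replicate]
  rw [prefix_char s.toList.reverse ii, List.length_reverse]

theorem key (s : String) : normalize_point s = normalize_point_alt s := by
  have hrange : PySem.List.pyRange 0 5 1 = [0,1,2,3,4] := by decide
  have hlen : (List.takeWhile (fun c => !decide (c = '.')) s.toList.reverse).length ≤ s.toList.length := by
    calc (List.takeWhile (fun c => !decide (c = '.')) s.toList.reverse).length
        ≤ s.toList.reverse.length := List.IsPrefix.length_le (List.takeWhile_prefix _)
      _ = s.toList.length := List.length_reverse
  unfold normalize_point normalize_point_alt rpartition_dot
  rw [hrange]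
  simp only [normalize_point_go, Int.toNat_zero, Int.toNat_one, ne_eq, decide_not,
    List.length_reverse, endswith_test,
    show Int.toNat 2 = 2 from rfl, show Int.toNat 3 = 3 from rfl, show Int.toNat 4 = 4 from rfl]
  set t := List.takeWhile (fun c => !decide (c = '.')) s.toList.reverse with ht
  have hL : s.toList.length = s.length := by simp
  by_cases hdot : t.length < s.toList.length
  · have hne : ¬ t.length = s.length := by omega
    by_cases hall : ∀ x ∈ t, x = '0'
    · by_cases hle : t.length ≤ 4
      · have h5 : t.length = 0 ∨ t.length = 1 ∨ t.length = 2 ∨ t.length = 3 ∨ t.length = 4 := by omega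
        rcases h5 with h|h|h|h|h
        · simp [h, show ¬ ((0:ℕ) = s.length) by omega, PySem.Str.slice, show (0:ℕ) < s.length by omega]
          rw [slice_neg _ _ (by norm_num) (by omega), if_pos hall, if_pos hall,
            show ((s.toList.length:Int) + -1).toNat = s.length - 1 by omega]
        · simp [h, show ¬ ((1:ℕ) = s.length) by omega, PySem.Str.slice, show (1:ℕ) < s.length by omega]
          rw [slice_neg _ _ (by norm_num) (by omega), if_pos hall, if_pos hall,
            show ((s.toList.length:Int) + -2).toNat = s.length - 1 - 1 by omega]
        · simp [h, show ¬ ((2:ℕ) = s.length) by omega, PySem.Str.slice, show (2:ℕ) < s.length by omega]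
          rw [slice_neg _ _ (by norm_num) (by omega), if_pos hall, if_pos hall,
            show ((s.toList.length:Int) + -3).toNat = s.length - 2 - 1 by omega]
        · simp [h, show ¬ ((3:ℕ) = s.length) by omega, PySem.Str.slice, show (3:ℕ) < s.length by omega]
          rw [slice_neg _ _ (by norm_num) (by omega), if_pos hall, if_pos hall,
            show ((s.toList.length:Int) + -4).toNat = s.length - 3 - 1 by omega]
        · simp [h, show ¬ ((4:ℕ) = s.length) by omega, PySem.Str.slice, show (4:ℕ) < s.length by omega]
          rw [slice_neg _ _ (by norm_num) (by omega), if_pos hall, if_pos hall,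
            show ((s.toList.length:Int) + -5).toNat = s.length - 4 - 1 by omega]
      · simp [hne, show ¬((0:ℕ) = t.length) by omega, show ¬((1:ℕ) = t.length) by omega,
          show ¬((2:ℕ) = t.length) by omega, show ¬((3:ℕ) = t.length) by omega,
          show ¬((4:ℕ) = t.length) by omega, hle]
    · simp [hall, hne]
  · have heq : t.length = s.length := by omega
    simp [heq]

-- ===== VERDICT (by name: the statement is the Claim_ definition above) =====
theorem normalize_point_spec : Claim_equal_normalize_point := by
  intro version_point _
  unfold Spec_normalize_point
  exact key version_point
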